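-- pv_equiv track=rewrite | github.com/Duy-Dev1512/AI_and_bro | 8Queen_Genetic.py | getBestIndividual
-- ===== SOURCE A (Python) =====
-- fitnessGoal = 28
--
-- def deleteIndividual(population, individual):
--     if (len(individual) != 0):
--         k = population.index(individual)
--         population.remove(population[k])
--
-- def getFitness(invididual: list):  # lấy ra giá trị thích nghi của một cá thể
--     conflict = 0  # giá trị xung đột
--     #hàng dọc
--     length = len(invididual)
--     for i in range(length- 1):
--         for j in range(i + 1, length):
--             if invididual[i] == invididual[j]:
--                 conflict += 1
--     #hàng ngang và chéo
--     for i in range(length - 1):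
--         for j in range(i + 1, length):
--             if abs(invididual[j] - invididual[i]) == abs(j - i):
--                 conflict += 1
--     return fitnessGoal - conflict
--
-- def getBestIndividual(population: list):
--     maxFitness = -1
--     individual = []
--     for x in population:
--         if (getFitness(x) > maxFitness):
--             maxFitness = getFitness(x)
--             individual = x
--     temp = individual.copy()
--     deleteIndividual(population, temp)
--     return individual
-- ===== SOURCE B (Python) =====
-- fitnessGoal = 28
--
-- def _fitness(x):
--     # O(n): hash positions into column / diagonal groups; each earlier queen in
--     # the same group is exactly one conflicting pair.
--     conflict = 0
--     cols = {}
--     diag1 = {}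
--     diag2 = {}
--     for i, v in enumerate(x):
--         conflict += cols.get(v, 0) + diag1.get(v - i, 0) + diag2.get(v + i, 0)
--         cols[v] = cols.get(v, 0) + 1
--         diag1[v - i] = diag1.get(v - i, 0) + 1
--         diag2[v + i] = diag2.get(v + i, 0) + 1
--     return fitnessGoal - conflict
--
-- def getBestIndividual(population: list):
--     best = []
--     bestFitness = -1
--     for x in population:
--         f = _fitness(x)
--         if f > bestFitness:
--             bestFitness = f
--             best = x
--     if best:
--         population.remove(best)
--     return best
-- ===== Notes on version B (the rewrite author's own statement) =====
-- stated objective: faster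
-- what changed: A counts conflicts with two O(n^2) nested index loops per individual (and evaluates getFitness twice on each improvement); B computes each fitness once in a single O(n) pass that hashes every queen into its column, row-minus-col and row-plus-col groups via three dicts, adding the number of earlier queens in the same group.
import Mathlib
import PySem

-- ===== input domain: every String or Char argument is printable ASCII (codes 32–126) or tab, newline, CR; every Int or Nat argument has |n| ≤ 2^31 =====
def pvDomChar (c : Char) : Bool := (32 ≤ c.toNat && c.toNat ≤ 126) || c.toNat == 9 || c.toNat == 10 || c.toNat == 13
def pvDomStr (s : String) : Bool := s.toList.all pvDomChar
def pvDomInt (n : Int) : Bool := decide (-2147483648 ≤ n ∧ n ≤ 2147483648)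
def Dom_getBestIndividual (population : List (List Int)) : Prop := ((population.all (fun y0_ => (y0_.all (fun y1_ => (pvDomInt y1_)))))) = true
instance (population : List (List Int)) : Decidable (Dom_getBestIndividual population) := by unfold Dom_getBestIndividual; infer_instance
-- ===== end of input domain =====

-- B replaces A's O(n^2)-pairs conflict scan per individual by one O(n) pass that hashes each
-- queen into its column and two diagonal groups and adds the number of earlier queens in the
-- same groups; the selection loop computes each fitness once. Both Pythons also mutate
-- `population` in place (they remove the first occurrence of the returned individual when it
-- is nonempty); the theorems here are about the RETURN value, and the mutations coincide.

-- ===== PORT A =====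
def pvGetFitness (x : List Int) : Int :=
  let n : Int := (x.length : Int)
  -- first double loop (same column), conflict from 0
  let c1 : Int := (PySem.List.pyRange 0 (n - 1) 1).foldl (fun c i =>
      (PySem.List.pyRange (i + 1) n 1).foldl (fun c j =>
        if PySem.List.pyGetD x i 0 == PySem.List.pyGetD x j 0 then c + 1 else c) c) 0
  -- second double loop (diagonals), conflict continued from c1
  let c2 : Int := (PySem.List.pyRange 0 (n - 1) 1).foldl (fun c i =>
      (PySem.List.pyRange (i + 1) n 1).foldl (fun c j =>
        if (PySem.List.pyGetD x j 0 - PySem.List.pyGetD x i 0).natAbs == (j - i).natAbs then c + 1 else c) c) c1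
  28 - c2

def getBestIndividual (population : List (List Int)) : List Int :=
  (population.foldl (fun (s : Int × List Int) x =>
    if pvGetFitness x > s.1 then (pvGetFitness x, x) else s) (-1, [])).2

-- ===== PORT B =====
def pvFitLoop : List (Int × Int) → Int → PySem.Dict Int Int → PySem.Dict Int Int → PySem.Dict Int Int → Int
  | [], conflict, _, _, _ => conflict
  | (i, v) :: rest, conflict, cols, d1, d2 =>
      pvFitLoop rest
        (conflict + cols.getD v 0 + d1.getD (v - i) 0 + d2.getD (v + i) 0)
        (cols.insert v (cols.getD v 0 + 1))
        (d1.insert (v - i) (d1.getD (v - i) 0 + 1))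
        (d2.insert (v + i) (d2.getD (v + i) 0 + 1))

def pvFitness (x : List Int) : Int :=
  28 - pvFitLoop (PySem.List.enumerate x 0) 0 PySem.Dict.empty PySem.Dict.empty PySem.Dict.empty

def getBestIndividual_alt (population : List (List Int)) : List Int :=
  (population.foldl (fun (s : List Int × Int) x =>
    let f := pvFitness x
    if f > s.2 then (x, f) else s) ([], -1)).1

-- ===== PRECONDITION & SPEC =====
def Spec_getBestIndividual (population : List (List Int)) (out : List Int) : Prop := out = getBestIndividual_alt population
instance (population : List (List Int)) (out : List Int) : Decidable (Spec_getBestIndividual population out) := by unfold Spec_getBestIndividual; infer_instance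

-- ===== CLAIM (what is proved, stated in full; the proofs are below) =====
def Claim_equal_getBestIndividual : Prop := ∀ (population : List (List Int)), Dom_getBestIndividual population → Spec_getBestIndividual population (getBestIndividual population)

-- ===== LEMMAS AND PROOFS =====

-- A's double loop over a predicate on (value_i, value_j, j - i), in sum form.
def pvT (q : Int → Int → Int → Bool) (x : List Int) : Int :=
  ((PySem.List.pyRange 0 ((x.length : Int) - 1) 1).map (fun i =>
     (((PySem.List.pyRange (i + 1) (x.length : Int) 1).countP
        (fun j => q (PySem.List.pyGetD x i 0) (PySem.List.pyGetD x j 0) (j - i)) : Nat) : Int))).sum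

-- number of equal unordered pairs in a key list (later-match form)
def pvPairs : List Int → Int
  | [] => 0
  | k :: ks => (ks.count k : Int) + pvPairs ks

-- B's running sum of earlier matches against one dict
def pvPrev (d : PySem.Dict Int Int) : List Int → Int
  | [] => 0
  | k :: ks => d.getD k 0 + pvPrev (d.insert k (d.getD k 0 + 1)) ks

-- the two diagonal key lists
def pvKs1 (x : List Int) : List Int := (PySem.List.enumerate x 0).map (fun p => p.2 - p.1)
def pvKs2 (x : List Int) : List Int := (PySem.List.enumerate x 0).map (fun p => p.2 + p.1)

theorem pvSumIndEq (t : List Int) (k : Int) :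
    (t.map (fun a => if a == k then (1 : Int) else 0)).sum = (t.count k : Int) := by
  rw [PySem.List.sum_map_ite_one_zero (fun a => a == k) t, List.count]

theorem pvCountAppSing (pre : List Int) (k a : Int) :
    ((pre ++ [k]).count a : Int) = (pre.count a : Int) + (if a == k then (1 : Int) else 0) := by
  by_cases h : a = k
  · subst h; simp [List.count_append]
  · simp [List.count_append, h, Ne.symm h]

theorem pvPairs_snoc (ks : List Int) (k : Int) :
    pvPairs (ks ++ [k]) = pvPairs ks + (ks.count k : Int) := by
  induction ks with
  | nil => simp [pvPairs]
  | cons a t ih =>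
      simp only [List.cons_append, pvPairs, ih, List.count_cons]
      rw [pvCountAppSing]
      push_cast
      ring

theorem pvCountSumSnoc (t : List Int) (pre : List Int) (k : Int) :
    (t.map (fun k' => ((pre ++ [k]).count k' : Int))).sum
      = (t.map (fun k' => (pre.count k' : Int))).sum + (t.count k : Int) := by
  have h1 : (t.map (fun k' => ((pre ++ [k]).count k' : Int))).sum
      = (t.map (fun k' => (pre.count k' : Int) + (if k' == k then (1:Int) else 0))).sum := by
    congr 1
    exact List.map_congr_left (fun a _ => pvCountAppSing pre k a)
  rw [h1, PySem.List.sum_map_add_int, pvSumIndEq]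

theorem pvPrev_count (ks : List Int) (pre : List Int) (d : PySem.Dict Int Int)
    (h : ∀ k, d.getD k 0 = (pre.count k : Int)) :
    pvPrev d ks = (ks.map (fun k => (pre.count k : Int))).sum + pvPairs ks := by
  induction ks generalizing pre d with
  | nil => simp [pvPrev, pvPairs]
  | cons k t ih =>
      have h' : ∀ k', (d.insert k (d.getD k 0 + 1)).getD k' 0 = ((pre ++ [k]).count k' : Int) := by
        intro k'
        rw [PySem.Dict.getD_insert, pvCountAppSing pre k k']
        by_cases hk : k' = k
        · simp [hk, h]
        · simp [hk, h]
      rw [pvPrev, pvPairs, ih (pre ++ [k]) _ h', h, pvCountSumSnoc]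
      simp only [List.map_cons, List.sum_cons]
      ring

theorem pvPrev_empty (ks : List Int) : pvPrev PySem.Dict.empty ks = pvPairs ks := by
  have := pvPrev_count ks [] PySem.Dict.empty (by intro k; simp [PySem.Dict.getD])
  simpa using this

theorem pvFitLoop_split (l : List (Int × Int)) (c : Int) (cols d1 d2 : PySem.Dict Int Int) :
    pvFitLoop l c cols d1 d2 =
      c + pvPrev cols (l.map (·.2)) + pvPrev d1 (l.map (fun p => p.2 - p.1))
        + pvPrev d2 (l.map (fun p => p.2 + p.1)) := by
  induction l generalizing c cols d1 d2 with
  | nil => simp [pvFitLoop, pvPrev]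
  | cons p rest ih =>
      obtain ⟨i, v⟩ := p
      simp only [pvFitLoop, List.map_cons, pvPrev, ih]
      ring

theorem pvFoldA (q : Int → Int → Int → Bool) (x : List Int) (c : Int) :
    (PySem.List.pyRange 0 ((x.length : Int) - 1) 1).foldl (fun c i =>
      (PySem.List.pyRange (i + 1) (x.length : Int) 1).foldl (fun c j =>
        if q (PySem.List.pyGetD x i 0) (PySem.List.pyGetD x j 0) (j - i) then c + 1 else c) c) c
    = c + pvT q x := by
  have h1 : ∀ (acc : Int) (i : Int),
      (PySem.List.pyRange (i + 1) (x.length : Int) 1).foldl (fun c j =>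
        if q (PySem.List.pyGetD x i 0) (PySem.List.pyGetD x j 0) (j - i) then c + 1 else c) acc
      = acc + (((PySem.List.pyRange (i + 1) (x.length : Int) 1).countP
          (fun j => q (PySem.List.pyGetD x i 0) (PySem.List.pyGetD x j 0) (j - i)) : Nat) : Int) := by
    intro acc i
    exact PySem.List.foldl_if_add_one _ _ acc
  calc (PySem.List.pyRange 0 ((x.length : Int) - 1) 1).foldl (fun c i =>
      (PySem.List.pyRange (i + 1) (x.length : Int) 1).foldl (fun c j =>
        if q (PySem.List.pyGetD x i 0) (PySem.List.pyGetD x j 0) (j - i) then c + 1 else c) c) c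
      = (PySem.List.pyRange 0 ((x.length : Int) - 1) 1).foldl (fun c i =>
          c + (((PySem.List.pyRange (i + 1) (x.length : Int) 1).countP
            (fun j => q (PySem.List.pyGetD x i 0) (PySem.List.pyGetD x j 0) (j - i)) : Nat) : Int)) c := by
        exact PySem.List.foldl_congr_mem _ _ _ _ (fun acc i _ => h1 acc i)
    _ = c + pvT q x := PySem.List.foldl_add _ _ c

theorem pvGetAppLt (x : List Int) (v i : Int) (h0 : 0 ≤ i) (h1 : i < (x.length : Int)) :
    PySem.List.pyGetD (x ++ [v]) i 0 = PySem.List.pyGetD x i 0 := by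
  rw [PySem.List.pyGetD_eq_getElem (x ++ [v]) 0 h0 (by simp; omega),
      PySem.List.pyGetD_eq_getElem x 0 h0 h1]
  exact List.getElem_append_left (by omega)

theorem pvGetAppLen (x : List Int) (v : Int) :
    PySem.List.pyGetD (x ++ [v]) (x.length : Int) 0 = v := by
  rw [PySem.List.pyGetD_eq_getElem (x ++ [v]) 0 (by positivity) (by simp)]
  simp

theorem pvT_snoc (q : Int → Int → Int → Bool) (x : List Int) (v : Int) :
    pvT q (x ++ [v]) = pvT q x +
      ((PySem.List.pyRange 0 (x.length : Int) 1).map (fun i =>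
        if q (PySem.List.pyGetD x i 0) v ((x.length : Int) - i) then (1 : Int) else 0)).sum := by
  rcases eq_or_ne x [] with rfl | hx
  · simp [pvT, PySem.List.pyRange_one_eq_nil]
  · have hn : 1 ≤ (x.length : Int) := by
      have := List.length_pos_of_ne_nil hx; omega
    set n : Int := (x.length : Int) with hndef
    have hlen : ((x ++ [v]).length : Int) = n + 1 := by simp [hndef]
    have houter : PySem.List.pyRange 0 ((n + 1) - 1) = PySem.List.pyRange 0 (n - 1) ++ [n - 1] := by
      have h1 : (n + 1) - 1 = (n - 1) + 1 := by ring
      rw [h1, PySem.List.pyRange_one_succ_right (by omega)]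
    have hterm : ∀ i : Int, 0 ≤ i → i < n - 1 →
        (((PySem.List.pyRange (i + 1) (n + 1)).countP
          (fun j => q (PySem.List.pyGetD (x ++ [v]) i 0) (PySem.List.pyGetD (x ++ [v]) j 0) (j - i)) : Nat) : Int)
        = (((PySem.List.pyRange (i + 1) n).countP
            (fun j => q (PySem.List.pyGetD x i 0) (PySem.List.pyGetD x j 0) (j - i)) : Nat) : Int)
          + (if q (PySem.List.pyGetD x i 0) v (n - i) then (1 : Int) else 0) := by
      intro i h0 h1
      rw [PySem.List.pyRange_one_succ_right (by omega), List.countP_append, List.countP_singleton]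
      have hgi : PySem.List.pyGetD (x ++ [v]) i 0 = PySem.List.pyGetD x i 0 :=
        pvGetAppLt x v i h0 (by omega)
      have hgn : PySem.List.pyGetD (x ++ [v]) n 0 = v := pvGetAppLen x v
      have hcp : (PySem.List.pyRange (i + 1) n).countP
            (fun j => q (PySem.List.pyGetD (x ++ [v]) i 0) (PySem.List.pyGetD (x ++ [v]) j 0) (j - i))
          = (PySem.List.pyRange (i + 1) n).countP
            (fun j => q (PySem.List.pyGetD x i 0) (PySem.List.pyGetD x j 0) (j - i)) := by
        apply List.countP_congr
        intro j hj
        rw [PySem.List.mem_pyRange_one] at hj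
        rw [hgi, pvGetAppLt x v j (by omega) (by omega)]
      rw [hcp, hgi, hgn]
      push_cast
      ring
    simp only [pvT, hlen]
    rw [houter, List.map_append, List.sum_append]
    have hmapL : (PySem.List.pyRange 0 (n - 1)).map (fun i =>
        (((PySem.List.pyRange (i + 1) (n + 1)).countP
          (fun j => q (PySem.List.pyGetD (x ++ [v]) i 0) (PySem.List.pyGetD (x ++ [v]) j 0) (j - i)) : Nat) : Int))
        = (PySem.List.pyRange 0 (n - 1)).map (fun i =>
          (((PySem.List.pyRange (i + 1) n).countP
            (fun j => q (PySem.List.pyGetD x i 0) (PySem.List.pyGetD x j 0) (j - i)) : Nat) : Int)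
          + (if q (PySem.List.pyGetD x i 0) v (n - i) then (1 : Int) else 0)) := by
      apply List.map_congr_left
      intro i hi
      rw [PySem.List.mem_pyRange_one] at hi
      exact hterm i hi.1 hi.2
    rw [hmapL, PySem.List.sum_map_add_int]
    have hlast : ((PySem.List.pyRange ((n - 1) + 1) (n + 1)).countP
          (fun j => q (PySem.List.pyGetD (x ++ [v]) (n - 1) 0) (PySem.List.pyGetD (x ++ [v]) j 0) (j - (n - 1))) : Int)
        = (if q (PySem.List.pyGetD x (n - 1) 0) v (n - (n - 1)) then (1 : Int) else 0) := by
      have h1 : (n - 1) + 1 = n := by ring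
      rw [h1]
      rw [PySem.List.pyRange_one_singleton n, List.countP_singleton,
        pvGetAppLt x v (n - 1) (by omega) (by omega), pvGetAppLen]
      push_cast
      ring_nf
    rw [← hndef]
    have hsplit : PySem.List.pyRange 0 n = PySem.List.pyRange 0 (n - 1) ++ [n - 1] := by
      have h := PySem.List.pyRange_one_succ_right (a := 0) (b := n - 1) (by omega)
      conv_lhs => rw [show n = n - 1 + 1 by ring]
      exact h
    rw [hsplit]
    simp only [List.map_append, List.sum_append, List.map_cons, List.map_nil, List.sum_cons,
      List.sum_nil, add_zero]
    rw [hlast]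
    ring

theorem pvT_eq1 (x : List Int) :
    pvT (fun a b _ => a == b) x = pvPairs x := by
  induction x using List.reverseRecOn with
  | nil => simp [pvT, pvPairs, PySem.List.pyRange_one_eq_nil]
  | append_singleton t v ih =>
      rw [pvT_snoc, ih, pvPairs_snoc]
      congr 1
      have hm : (PySem.List.pyRange 0 (t.length : Int)).map
            (fun i => if PySem.List.pyGetD t i 0 == v then (1 : Int) else 0)
          = ((PySem.List.pyRange 0 (t.length : Int)).map
              (fun i => PySem.List.pyGetD t i 0)).map (fun a => if a == v then (1 : Int) else 0) := by
        rw [List.map_map]; rfl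
      rw [hm, PySem.List.map_pyGetD_pyRange_zero', pvSumIndEq]

theorem pvIndDiag (a i n v : Int) (_h0 : 0 ≤ i) (h1 : i < n) :
    (if (v - a).natAbs == (n - i).natAbs then (1 : Int) else 0)
      = (if a - i == v - n then (1 : Int) else 0) + (if a + i == v + n then (1 : Int) else 0) := by
  simp only [beq_iff_eq]
  split_ifs <;> omega

theorem pvKs1_snoc (t : List Int) (v : Int) :
    pvKs1 (t ++ [v]) = pvKs1 t ++ [v - (t.length : Int)] := by
  simp [pvKs1, PySem.List.enumerate_append, PySem.List.enumerate_cons, PySem.List.enumerate_nil]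

theorem pvKs2_snoc (t : List Int) (v : Int) :
    pvKs2 (t ++ [v]) = pvKs2 t ++ [v + (t.length : Int)] := by
  simp [pvKs2, PySem.List.enumerate_append, PySem.List.enumerate_cons, PySem.List.enumerate_nil]

theorem pvKs1_eq_map_range (t : List Int) :
    pvKs1 t = (PySem.List.pyRange 0 (t.length : Int)).map (fun j => PySem.List.pyGetD t j 0 - j) := by
  rw [pvKs1, PySem.List.enumerate_eq_map_pyRange t 0, List.map_map]
  simp [Function.comp]

theorem pvKs2_eq_map_range (t : List Int) :
    pvKs2 t = (PySem.List.pyRange 0 (t.length : Int)).map (fun j => PySem.List.pyGetD t j 0 + j) := by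
  rw [pvKs2, PySem.List.enumerate_eq_map_pyRange t 0, List.map_map]
  simp [Function.comp]

theorem pvT_eq2 (x : List Int) :
    pvT (fun a b d => (b - a).natAbs == d.natAbs) x = pvPairs (pvKs1 x) + pvPairs (pvKs2 x) := by
  induction x using List.reverseRecOn with
  | nil => simp [pvT, pvPairs, pvKs1, pvKs2, PySem.List.pyRange_one_eq_nil, PySem.List.enumerate_nil]
  | append_singleton t v ih =>
      rw [pvT_snoc, ih, pvKs1_snoc, pvKs2_snoc, pvPairs_snoc, pvPairs_snoc]
      have hsplit : (PySem.List.pyRange 0 (t.length : Int)).map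
            (fun i => if (v - PySem.List.pyGetD t i 0).natAbs == ((t.length : Int) - i).natAbs then (1 : Int) else 0)
          = (PySem.List.pyRange 0 (t.length : Int)).map
            (fun i => (if PySem.List.pyGetD t i 0 - i == v - (t.length : Int) then (1 : Int) else 0)
              + (if PySem.List.pyGetD t i 0 + i == v + (t.length : Int) then (1 : Int) else 0)) := by
        apply List.map_congr_left
        intro i hi
        rw [PySem.List.mem_pyRange_one] at hi
        exact pvIndDiag (PySem.List.pyGetD t i 0) i (t.length : Int) v hi.1 hi.2
      rw [hsplit, PySem.List.sum_map_add_int]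
      have hc1 : ((PySem.List.pyRange 0 (t.length : Int)).map
            (fun i => if PySem.List.pyGetD t i 0 - i == v - (t.length : Int) then (1 : Int) else 0)).sum
          = ((pvKs1 t).count (v - (t.length : Int)) : Int) := by
        rw [pvKs1_eq_map_range,
          ← pvSumIndEq ((PySem.List.pyRange 0 (t.length : Int)).map (fun j => PySem.List.pyGetD t j 0 - j)) (v - (t.length : Int)),
          List.map_map]
        rfl
      have hc2 : ((PySem.List.pyRange 0 (t.length : Int)).map
            (fun i => if PySem.List.pyGetD t i 0 + i == v + (t.length : Int) then (1 : Int) else 0)).sum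
          = ((pvKs2 t).count (v + (t.length : Int)) : Int) := by
        rw [pvKs2_eq_map_range,
          ← pvSumIndEq ((PySem.List.pyRange 0 (t.length : Int)).map (fun j => PySem.List.pyGetD t j 0 + j)) (v + (t.length : Int)),
          List.map_map]
        rfl
      rw [hc1, hc2]
      ring

theorem pvFitEq (x : List Int) : pvGetFitness x = pvFitness x := by
  have hA : pvGetFitness x
      = 28 - ((0 + pvT (fun a b _ => a == b) x) + pvT (fun a b d => (b - a).natAbs == d.natAbs) x) := by
    show 28 - _ = _
    rw [pvFoldA (fun a b _ => a == b) x 0,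
        pvFoldA (fun a b d => (b - a).natAbs == d.natAbs) x (0 + pvT (fun a b _ => a == b) x)]
  have hB : pvFitness x = 28 - (pvPairs x + pvPairs (pvKs1 x) + pvPairs (pvKs2 x)) := by
    show 28 - _ = _
    rw [pvFitLoop_split, PySem.List.map_snd_enumerate]
    rw [show ((PySem.List.enumerate x 0).map (fun p => p.2 - p.1)) = pvKs1 x from rfl,
        show ((PySem.List.enumerate x 0).map (fun p => p.2 + p.1)) = pvKs2 x from rfl]
    rw [pvPrev_empty, pvPrev_empty, pvPrev_empty]
    ring
  rw [hA, hB, pvT_eq1, pvT_eq2]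
  ring

theorem pvOuter (pop : List (List Int)) (m : Int) (b : List Int) :
    (pop.foldl (fun (s : Int × List Int) x =>
        if pvGetFitness x > s.1 then (pvGetFitness x, x) else s) (m, b)).2
    = (pop.foldl (fun (s : List Int × Int) x =>
        let f := pvFitness x
        if f > s.2 then (x, f) else s) (b, m)).1 := by
  induction pop generalizing m b with
  | nil => rfl
  | cons y t ih =>
      simp only [List.foldl_cons, pvFitEq y]
      by_cases h : pvFitness y > m
      · simp only [h]; exact ih _ _
      · simp only [h]; exact ih _ _

-- ===== VERDICT (by name: the statement is the Claim_ definition above) =====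
theorem getBestIndividual_spec : Claim_equal_getBestIndividual := by
  intro population _
  show getBestIndividual population = getBestIndividual_alt population
  exact pvOuter population (-1) []
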